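-- pv_equiv track=rewrite | github.com/JTRC83/velora-prismatika | services/numerology_service/numerology_service.py | name_to_number
-- ===== SOURCE A (Python) =====
-- def mistic_reduction(number: int) -> int:
--     """Reduce un número a un solo dígito (1-9) respetando los Maestros (11, 22)."""
--     while number > 9 and number not in [11, 22]:
--         number = sum(int(d) for d in str(number))
--     return number
--
-- def name_to_number(name: str) -> int:
--     """Convierte un nombre a su vibración numérica (Gematría Pitagórica)."""
--     alphabet_map = {
--         'a': 1, 'j': 1, 's': 1, 'b': 2, 'k': 2, 't': 2, 'c': 3, 'l': 3, 'u': 3,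
--         'd': 4, 'm': 4, 'v': 4, 'e': 5, 'n': 5, 'w': 5, 'f': 6, 'o': 6, 'x': 6,
--         'g': 7, 'p': 7, 'y': 7, 'h': 8, 'q': 8, 'z': 8, 'i': 9, 'r': 9
--     }
--     total = sum(alphabet_map.get(char.lower(), 0) for char in name if char.isalpha())
--     return mistic_reduction(total)
-- ===== SOURCE B (Python) =====
-- def _reduce(n):
--     if n <= 9 or n == 11 or n == 22:
--         return n
--     s = 0
--     while n > 0:
--         s += n % 10
--         n //= 10
--     return _reduce(s)
--
-- def name_to_number(name: str) -> int:
--     total = 0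
--     for char in name:
--         if char.isalpha():
--             c = char.lower()
--             if 'a' <= c <= 'z':
--                 total += (ord(c) - ord('a')) % 9 + 1
--     return _reduce(total)
-- ===== Notes on version B (the rewrite author's own statement) =====
-- stated objective: simpler
-- what changed: B replaces the 26-entry lookup dict with the closed-form modular letter value (alphabet offset mod 9, plus one) computed in a single accumulator loop, and replaces the str()/int() digit-reduction round-trip with an arithmetic mod-10/floordiv-10 loop in a recursive reducer.
import Mathlib
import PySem

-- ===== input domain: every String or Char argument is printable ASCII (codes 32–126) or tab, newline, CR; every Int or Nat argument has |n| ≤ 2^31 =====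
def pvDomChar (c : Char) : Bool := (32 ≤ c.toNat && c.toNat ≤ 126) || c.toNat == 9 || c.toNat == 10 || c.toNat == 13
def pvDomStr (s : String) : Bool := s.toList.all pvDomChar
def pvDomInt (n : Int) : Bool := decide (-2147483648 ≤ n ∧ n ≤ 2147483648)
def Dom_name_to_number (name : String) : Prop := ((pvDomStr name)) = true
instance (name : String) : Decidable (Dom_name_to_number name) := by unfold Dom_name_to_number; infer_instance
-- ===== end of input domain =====

-- B computes the Pythagorean letter value by a closed-form modular formula instead of A's
-- 26-entry lookup dict, and reduces digits arithmetically instead of via str()/int(); objective: simpler.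

-- ===== PORT A =====

-- arithmetic digit sum, used only to prove termination of the two reduction loops
def pvDigsum (n : Nat) : Nat :=
  if h : n = 0 then 0 else n % 10 + pvDigsum (n / 10)
termination_by n
decreasing_by exact Nat.div_lt_self (Nat.pos_of_ne_zero h) (by norm_num)

lemma pvDigsum_eq {n : Nat} (h : n ≠ 0) : pvDigsum n = n % 10 + pvDigsum (n / 10) := by
  rw [pvDigsum, dif_neg h]

-- sum(int(d) for d in str(number)); int(d) cannot raise here since str(n) of a nonnegative
-- int is all digits, so `.getD 0` is exact on every call site
def strDigitSum (n : Int) : Int :=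
  ((PySem.Int.toChars n).map (fun c => (PySem.Int.ofChars? [c]).getD 0)).sum

lemma pvVal_digitChar (d : Nat) (h : d < 10) :
    (PySem.Int.ofChars? [Nat.digitChar d]).getD 0 = (d : Int) := by
  interval_cases d <;> decide

lemma pvTdc_sum : ∀ (f : Nat) (n : Nat) (acc : List Char), n < f →
    ((Nat.toDigitsCore 10 f n acc).map (fun c => (PySem.Int.ofChars? [c]).getD 0)).sum
      = (pvDigsum n : Int) + ((acc.map (fun c => (PySem.Int.ofChars? [c]).getD 0)).sum) := by
  intro f
  induction f with
  | zero => intro n acc h; omega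
  | succ f ih =>
    intro n acc h
    rw [Nat.toDigitsCore]
    by_cases h0 : n / 10 = 0
    · simp only [h0, if_true, List.map_cons, List.sum_cons,
        pvVal_digitChar (n % 10) (Nat.mod_lt _ (by norm_num))]
      by_cases hn : n = 0
      · simp [hn, pvDigsum]
      · rw [pvDigsum_eq hn, h0]
        simp [pvDigsum]
    · rw [if_neg h0]
      have hlt : n / 10 < f := by
        have h1 : 0 < n := by
          by_contra hc
          exact h0 (by omega)
        have := Nat.div_lt_self h1 (by norm_num : (1:Nat) < 10)
        omega
      rw [ih (n / 10) (Nat.digitChar (n % 10) :: acc) hlt]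
      simp only [List.map_cons, List.sum_cons,
        pvVal_digitChar (n % 10) (Nat.mod_lt _ (by norm_num))]
      rw [pvDigsum_eq (by omega : n ≠ 0)]
      push_cast
      ring

lemma pvStrDigitSum_nat (m : Nat) : strDigitSum (m : Int) = (pvDigsum m : Int) := by
  rw [strDigitSum, PySem.Int.toChars]
  rw [if_neg (by omega : ¬ (m : Int) < 0)]
  rw [Nat.toDigits]
  rw [pvTdc_sum (((m:Int).toNat) + 1) ((m:Int).toNat) [] (by omega)]
  simp

lemma pvDigsum_le (m : Nat) : pvDigsum m ≤ m := by
  induction m using Nat.strong_induction_on with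
  | _ m ih =>
    rw [pvDigsum]
    by_cases hm : m = 0
    · simp [hm]
    · rw [dif_neg hm]
      have := ih (m / 10) (Nat.div_lt_self (Nat.pos_of_ne_zero hm) (by norm_num))
      omega

lemma pvDigsum_lt (m : Nat) (h : 10 ≤ m) : pvDigsum m < m := by
  rw [pvDigsum, dif_neg (by omega : ¬ m = 0)]
  have := pvDigsum_le (m / 10)
  omega

lemma pvStrDigitSum_lt (n : Int) (h : 9 < n) : (strDigitSum n).toNat < n.toNat := by
  have hn : n = ((n.toNat : Nat) : Int) := by omega
  rw [hn, pvStrDigitSum_nat]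
  have := pvDigsum_lt n.toNat (by omega)
  omega

def mistic_reduction (number : Int) : Int :=
  if h : 9 < number ∧ ¬ ([(11 : Int), 22].contains number = true) then
    mistic_reduction (strDigitSum number)
  else number
termination_by number.toNat
decreasing_by exact pvStrDigitSum_lt number h.1

def alphabet_map : PySem.Dict Char Int := PySem.Dict.ofList
  [('a',1),('j',1),('s',1),('b',2),('k',2),('t',2),('c',3),('l',3),('u',3),
   ('d',4),('m',4),('v',4),('e',5),('n',5),('w',5),('f',6),('o',6),('x',6),
   ('g',7),('p',7),('y',7),('h',8),('q',8),('z',8),('i',9),('r',9)]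

def name_to_number (name : String) : Int :=
  mistic_reduction
    (((name.toList.filter (fun char => PySem.Chars.isalpha char)).map
        (fun char => alphabet_map.getD (PySem.Chars.lowerChar char) 0)).sum)

-- ===== PORT B =====

-- while n > 0: s += n % 10; n //= 10
def digit_sum_loop (n s : Int) : Int :=
  if h : 0 < n then digit_sum_loop (PySem.Int.floordiv n 10) (s + PySem.Int.mod n 10) else s
termination_by n.toNat
decreasing_by
  rw [PySem.Int.floordiv_eq_ediv_of_pos (by norm_num)]
  have h3 : n / 10 = ((n.toNat / 10 : Nat) : Int) := by
    conv_lhs => rw [show n = ((n.toNat : Nat) : Int) from by omega]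
    norm_cast
  rw [h3]
  simp only [Int.toNat_natCast]
  exact Nat.div_lt_self (by omega) (by norm_num)

lemma pvDigit_sum_loop_eq : ∀ (m : Nat) (n s : Int), 0 ≤ n → n.toNat = m →
    digit_sum_loop n s = s + (pvDigsum m : Int) := by
  intro m
  induction m using Nat.strong_induction_on with
  | _ m ih =>
    intro n s hn hm
    rw [digit_sum_loop.eq_def]
    by_cases h0 : 0 < n
    · rw [dif_pos h0]
      rw [PySem.Int.floordiv_eq_ediv_of_pos (by norm_num), PySem.Int.mod_eq_emod_of_pos (by norm_num)]
      have hrep : n = ((m : Nat) : Int) := by omega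
      have hdiv : n / 10 = (((m / 10 : Nat)) : Int) := by rw [hrep]; norm_cast
      have hmod : n % 10 = (((m % 10 : Nat)) : Int) := by rw [hrep]; norm_cast
      rw [hdiv, hmod, ih (m / 10) (Nat.div_lt_self (by omega) (by norm_num)) _ _ (by omega) (by omega)]
      rw [pvDigsum_eq (by omega : m ≠ 0)]
      push_cast
      ring
    · rw [dif_neg h0]
      have : m = 0 := by omega
      rw [this, pvDigsum]
      simp

def reduce_alt (n : Int) : Int :=
  if h : n ≤ 9 ∨ n = 11 ∨ n = 22 then n else reduce_alt (digit_sum_loop n 0)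
termination_by n.toNat
decreasing_by
  rw [pvDigit_sum_loop_eq n.toNat n 0 (by omega) rfl]
  have := pvDigsum_lt n.toNat (by omega)
  omega

def name_to_number_alt (name : String) : Int :=
  reduce_alt
    (name.toList.foldl
      (fun total char =>
        if PySem.Chars.isalpha char then
          let c := PySem.Chars.lowerChar char
          if 'a' ≤ c ∧ c ≤ 'z' then
            total + (PySem.Int.mod ((c.toNat : Int) - ('a'.toNat : Int)) 9 + 1)
          else total
        else total)
      0)

-- ===== PRECONDITION & SPEC =====
def Spec_name_to_number (name : String) (out : Int) : Prop := out = name_to_number_alt name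
instance (name : String) (out : Int) : Decidable (Spec_name_to_number name out) := by unfold Spec_name_to_number; infer_instance

-- ===== CLAIM (what is proved, stated in full; the proofs are below) =====
def Claim_equal_name_to_number : Prop := ∀ (name : String), Dom_name_to_number name → Spec_name_to_number name (name_to_number name)

-- ===== LEMMAS AND PROOFS =====

-- B's per-character contribution (closed form)
def pvStepB : Int → Char → Int := fun total char =>
  if PySem.Chars.isalpha char then
    let c := PySem.Chars.lowerChar char
    if 'a' ≤ c ∧ c ≤ 'z' then
      total + (PySem.Int.mod ((c.toNat : Int) - ('a'.toNat : Int)) 9 + 1)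
    else total
  else total

-- A's per-character contribution (table lookup)
def pvContribA (char : Char) : Int :=
  if PySem.Chars.isalpha char then alphabet_map.getD (PySem.Chars.lowerChar char) 0 else 0

set_option maxRecDepth 100000 in
lemma pvStep_eq_contrib (t : Int) (c : Char) (h : pvDomChar c = true) :
    pvStepB t c = t + pvContribA c := by
  have h127 : c.toNat < 127 := by
    simp only [pvDomChar, Bool.or_eq_true, Bool.and_eq_true, decide_eq_true_eq, beq_iff_eq] at h
    omega
  have key : ∀ i : Fin 127, pvStepB 0 (Char.ofNat i.val) = pvContribA (Char.ofNat i.val) := by decide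
  have shift : ∀ t' c', pvStepB t' c' = t' + pvStepB 0 c' := by
    intro t' c'
    simp only [pvStepB]
    split_ifs <;> ring
  rw [shift, ← Char.ofNat_toNat c, key ⟨c.toNat, h127⟩]

lemma pvFoldl_eq (l : List Char) (acc : Int) (h : l.all pvDomChar = true) :
    l.foldl pvStepB acc = acc + ((l.filter (fun char => PySem.Chars.isalpha char)).map
        (fun char => alphabet_map.getD (PySem.Chars.lowerChar char) 0)).sum := by
  induction l generalizing acc with
  | nil => simp
  | cons c t ih =>
    simp only [List.all_cons, Bool.and_eq_true] at h
    rw [List.foldl_cons, pvStep_eq_contrib acc c h.1, ih _ h.2]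
    simp only [pvContribA, List.filter_cons]
    by_cases hc : PySem.Chars.isalpha c = true
    · simp [hc]; ring
    · simp [hc]

lemma pvReduce_eq (m : Nat) : ∀ (n : Int), 0 ≤ n → n.toNat = m →
    mistic_reduction n = reduce_alt n := by
  induction m using Nat.strong_induction_on with
  | _ m ih =>
    intro n hn hm
    rw [mistic_reduction, reduce_alt]
    by_cases hrec : 9 < n ∧ ¬ ([(11 : Int), 22].contains n = true)
    · rw [dif_pos hrec]
      have hcond : ¬ (n ≤ 9 ∨ n = 11 ∨ n = 22) := by
        simp only [List.contains_cons, List.contains_nil, Bool.or_eq_true, beq_iff_eq] at hrec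
        push_neg
        refine ⟨by omega, ?_, ?_⟩ <;> · intro he; exact hrec.2 (by simp [he])
      rw [dif_neg hcond]
      have hds : strDigitSum n = (pvDigsum n.toNat : Int) := by
        conv_lhs => rw [show n = ((n.toNat : Nat) : Int) from by omega]
        rw [pvStrDigitSum_nat]
      have hloop : digit_sum_loop n 0 = (pvDigsum n.toNat : Int) := by
        rw [pvDigit_sum_loop_eq n.toNat n 0 hn rfl]; ring
      rw [hds, hloop]
      have hlt : pvDigsum n.toNat < m := by
        have := pvDigsum_lt n.toNat (by omega)
        omega
      exact ih (pvDigsum n.toNat) hlt _ (by omega) (by omega)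
    · rw [dif_neg hrec]
      have hcond : n ≤ 9 ∨ n = 11 ∨ n = 22 := by
        simp only [List.contains_cons, List.contains_nil, Bool.or_eq_true, beq_iff_eq, not_and,
          not_not] at hrec
        by_cases h9 : 9 < n
        · have := hrec h9
          simp at this
          omega
        · omega
      rw [dif_pos hcond]

lemma pvStepB_ge (l : List Char) (acc : Int) : acc ≤ l.foldl pvStepB acc := by
  induction l generalizing acc with
  | nil => simp
  | cons c t ih =>
    refine le_trans ?_ (ih (pvStepB acc c))
    simp only [pvStepB]
    split_ifs with h1 h2
    · have := PySem.Int.mod_nonneg (a := ((PySem.Chars.lowerChar c).toNat : Int) - ('a'.toNat : Int)) (by norm_num : (0:Int) < 9)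
      omega
    · exact le_refl acc
    · exact le_refl acc

-- ===== VERDICT (by name: the statement is the Claim_ definition above) =====
theorem name_to_number_spec : Claim_equal_name_to_number := by
  intro name hdom
  unfold Spec_name_to_number name_to_number name_to_number_alt
  have hall : name.toList.all pvDomChar = true := hdom
  have hfold := pvFoldl_eq name.toList 0 hall
  have hge := pvStepB_ge name.toList 0
  set tA := ((name.toList.filter (fun char => PySem.Chars.isalpha char)).map
      (fun char => alphabet_map.getD (PySem.Chars.lowerChar char) 0)).sum with htA
  have hfold' : name.toList.foldl pvStepB 0 = tA := by rw [hfold]; ring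
  have hnn : 0 ≤ tA := by rw [← hfold']; exact hge
  rw [show (name.toList.foldl
      (fun total char =>
        if PySem.Chars.isalpha char then
          let c := PySem.Chars.lowerChar char
          if 'a' ≤ c ∧ c ≤ 'z' then
            total + (PySem.Int.mod ((c.toNat : Int) - ('a'.toNat : Int)) 9 + 1)
          else total
        else total) 0) = name.toList.foldl pvStepB 0 from rfl, hfold']
  exact pvReduce_eq tA.toNat tA hnn rfl
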